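-- pv_equiv track=rewrite | github.com/kikass13/pyfoobar | direction_reversal_trajectoy/test2.py | find_reversal_points
-- ===== SOURCE A (Python) =====
-- def find_reversal_points(trajectory):
--     reversal_indices = []
--     prev_dir = 0
--     for i, (_, _, v) in enumerate(trajectory):
--         dir_now = 1 if v > 0 else (-1 if v < 0 else 0)
--         if prev_dir != 0 and dir_now != 0 and dir_now != prev_dir:
--             reversal_indices.append(i)
--         if dir_now != 0:
--             prev_dir = dir_now
--     return reversal_indices
-- ===== SOURCE B (Python) =====
-- def find_reversal_points(trajectory):
--     pts = [(i, 1 if v > 0 else -1)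
--            for i, (_, _, v) in enumerate(trajectory) if v != 0]
--     return [j for (_, s1), (j, s2) in zip(pts, pts[1:]) if s1 != s2]
-- ===== Notes on version B (the rewrite author's own statement) =====
-- stated objective: alternative
-- what changed: Replaces A's single stateful loop (carrying prev_dir across zero-velocity points) with an index/sign table of the nonzero-velocity points followed by a pairwise sign-difference scan over consecutive table entries.
import Mathlib
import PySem

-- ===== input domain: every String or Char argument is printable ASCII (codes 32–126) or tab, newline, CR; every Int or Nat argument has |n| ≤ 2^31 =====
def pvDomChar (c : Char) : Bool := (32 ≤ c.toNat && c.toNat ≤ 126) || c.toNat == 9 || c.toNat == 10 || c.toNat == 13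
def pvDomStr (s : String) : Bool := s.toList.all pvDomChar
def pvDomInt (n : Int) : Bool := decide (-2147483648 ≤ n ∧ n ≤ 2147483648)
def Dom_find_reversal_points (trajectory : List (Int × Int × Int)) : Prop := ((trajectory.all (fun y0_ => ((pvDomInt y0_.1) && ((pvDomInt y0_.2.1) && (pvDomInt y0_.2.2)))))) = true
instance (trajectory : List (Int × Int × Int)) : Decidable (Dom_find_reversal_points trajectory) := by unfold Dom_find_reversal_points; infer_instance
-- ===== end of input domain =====

-- B replaces A's single stateful loop by an index/sign table of nonzero-velocity
-- points followed by a pairwise scan; same O(n) cost, different decomposition.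

-- ===== PORT A =====
-- the body of A's for-loop: state (acc, prev_dir), index i
def pvLoopA : List (Int × Int × Int) → Int → Int → List Int → List Int
  | [], _, _, acc => acc
  | (_, _, v) :: rest, i, prev, acc =>
    let d : Int := if v > 0 then 1 else (if v < 0 then -1 else 0)
    let acc' := if prev ≠ 0 ∧ d ≠ 0 ∧ d ≠ prev then acc ++ [i] else acc
    pvLoopA rest (i + 1) (if d ≠ 0 then d else prev) acc'

def find_reversal_points (trajectory : List (Int × Int × Int)) : List Int :=
  pvLoopA trajectory 0 0 []

-- ===== PORT B =====
-- the filtered (original index, sign) table of Source B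
def pvTableB (trajectory : List (Int × Int × Int)) : List (Int × Int) :=
  (PySem.List.enumerate trajectory).filterMap
    (fun p => if p.2.2.2 ≠ 0 then some (p.1, if p.2.2.2 > 0 then (1 : Int) else -1) else none)

def find_reversal_points_alt (trajectory : List (Int × Int × Int)) : List Int :=
  let pts := pvTableB trajectory
  (pts.zip pts.tail).filterMap (fun q => if q.1.2 ≠ q.2.2 then some q.2.1 else none)

-- ===== PRECONDITION & SPEC =====
def Spec_find_reversal_points (trajectory : List (Int × Int × Int)) (out : List Int) : Prop := out = find_reversal_points_alt trajectory
instance (trajectory : List (Int × Int × Int)) (out : List Int) : Decidable (Spec_find_reversal_points trajectory out) := by unfold Spec_find_reversal_points; infer_instance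

-- ===== CLAIM (what is proved, stated in full; the proofs are below) =====
def Claim_equal_find_reversal_points : Prop := ∀ (trajectory : List (Int × Int × Int)), Dom_find_reversal_points trajectory → Spec_find_reversal_points trajectory (find_reversal_points trajectory)

-- ===== LEMMAS AND PROOFS =====
-- pair scan carrying the previous sign (0 = none yet): intermediate characterisation
def pvScan : Int → List (Int × Int) → List Int
  | _, [] => []
  | prev, (j, s) :: rest =>
    (if prev ≠ 0 ∧ s ≠ prev then [j] else []) ++ pvScan s rest

theorem pvLoopA_eq_scan (l : List (Int × Int × Int)) :
    ∀ (i prev : Int) (acc : List Int),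
      pvLoopA l i prev acc =
        acc ++ pvScan prev ((PySem.List.enumerate l i).filterMap
          (fun p => if p.2.2.2 ≠ 0 then some (p.1, if p.2.2.2 > 0 then (1 : Int) else -1) else none)) := by
  induction l with
  | nil => intro i prev acc; simp [pvLoopA, PySem.List.enumerate_nil, pvScan]
  | cons hd tl ih =>
    rintro i prev acc
    obtain ⟨x, y, v⟩ := hd
    rw [pvLoopA, PySem.List.enumerate_cons]
    by_cases hv : v = 0
    · subst hv
      simp only [List.filterMap_cons]
      norm_num [ih]
    · rcases lt_trichotomy v 0 with h | h | h
      · have hvn : ¬ v > 0 := by omega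
        simp only [List.filterMap_cons, hvn, h, if_pos, ih]
        norm_num
        rw [if_neg hv]
        simp only [pvScan]
        split_ifs <;> simp_all
      · omega
      · have hvn : v > 0 := h
        simp only [List.filterMap_cons, hvn, if_pos, ih]
        norm_num
        rw [if_neg hv]
        simp only [pvScan]
        split_ifs <;> simp_all

-- every sign in the table is nonzero
theorem pvTable_nonzero (l : List (Int × Int × Int)) (i : Int) :
    ∀ p ∈ (PySem.List.enumerate l i).filterMap
        (fun p => if p.2.2.2 ≠ 0 then some (p.1, if p.2.2.2 > 0 then (1 : Int) else -1) else none),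
      p.2 ≠ 0 := by
  intro p hp
  rcases List.mem_filterMap.mp hp with ⟨q, _, hq⟩
  by_cases h : q.2.2.2 = 0
  · simp [h] at hq
  · rw [if_pos h] at hq
    cases hq
    by_cases h2 : q.2.2.2 > 0 <;> simp [h2]

-- the pairwise zip scan equals pvScan seeded with the first sign
theorem pvZipAux : ∀ (rest : List (Int × Int)) (j1 s1 : Int), s1 ≠ 0 → (∀ p ∈ rest, p.2 ≠ 0) →
    ((((j1, s1) :: rest)).zip rest).filterMap
        (fun q => if q.1.2 ≠ q.2.2 then some q.2.1 else none) =
      pvScan s1 rest := by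
  intro rest
  induction rest with
  | nil => intro j1 s1 _ _; simp [pvScan]
  | cons b rest2 ih =>
    intro j1 s1 hs1 hnz
    obtain ⟨j2, s2⟩ := b
    have hs2 : s2 ≠ 0 := hnz (j2, s2) (by simp)
    have hrest : ∀ p ∈ rest2, p.2 ≠ 0 := fun p hp => hnz p (by simp [hp])
    simp only [List.zip_cons_cons, List.filterMap_cons, pvScan]
    rw [ih j2 s2 hs2 hrest]
    by_cases hne : s1 = s2
    · subst hne
      simp [hs1]
    · have h1 : (if ((j1, s1), (j2, s2)).1.2 ≠ ((j1, s1), (j2, s2)).2.2 then some ((j1, s1), (j2, s2)).2.1 else none) = some j2 := by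
        simp [hne]
      rw [h1, if_pos ⟨hs1, fun hh => hne hh.symm⟩]
      simp

theorem pvZip_eq_scan : ∀ (pts : List (Int × Int)), (∀ p ∈ pts, p.2 ≠ 0) →
    (pts.zip pts.tail).filterMap (fun q => if q.1.2 ≠ q.2.2 then some q.2.1 else none) =
      pvScan 0 pts := by
  intro pts hnz
  cases pts with
  | nil => simp [pvScan]
  | cons a rest =>
    obtain ⟨j1, s1⟩ := a
    have hs1 : s1 ≠ 0 := hnz (j1, s1) (by simp)
    have hrest : ∀ p ∈ rest, p.2 ≠ 0 := fun p hp => hnz p (by simp [hp])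
    have h0 : pvScan 0 ((j1, s1) :: rest) = pvScan s1 rest := by simp [pvScan]
    rw [List.tail_cons, h0, pvZipAux rest j1 s1 hs1 hrest]

-- ===== VERDICT (by name: the statement is the Claim_ definition above) =====
theorem find_reversal_points_spec : Claim_equal_find_reversal_points := by
  intro t _
  unfold Spec_find_reversal_points find_reversal_points find_reversal_points_alt pvTableB
  rw [pvLoopA_eq_scan]
  rw [pvZip_eq_scan _ (pvTable_nonzero t 0)]
  simp
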